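-- pv_equiv track=rewrite | github.com/UofT-CSC490-F2025/Immigreat | src/scraping/ircc_scraper.py | detect_requires_js
-- ===== SOURCE A (Python) =====
-- def detect_requires_js(html_text):
--     """Heuristic: detect if content says JS required or modern widget placeholders."""
--     if not html_text:
--         return True
--     markers = [
--         "You need a browser that supports JavaScript",
--         "JavaScript must be enabled",
--         "This page requires JavaScript",
--         "Enable JavaScript",
--         "Check our current processing times",  # processing times uses JS widget
--     ]
--     for m in markers:
--         if m.lower() in html_text.lower():
--             return True
--     return False
-- ===== SOURCE B (Python) =====
-- def detect_requires_js(html_text):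
--     """One forward pass over the text: at each position, test whether any
--     (pre-lowercased) marker starts there, instead of rescanning the whole
--     text once per marker."""
--     if not html_text:
--         return True
--     text = html_text.lower()
--     markers = [m.lower() for m in [
--         "You need a browser that supports JavaScript",
--         "JavaScript must be enabled",
--         "This page requires JavaScript",
--         "Enable JavaScript",
--         "Check our current processing times",
--     ]]
--     return any(text.startswith(m, i) for i in range(len(text)) for m in markers)
-- ===== Notes on version B (the rewrite author's own statement) =====
-- stated objective: alternative
-- what changed: B lowercases the text once and makes a single left-to-right pass, testing at each position whether any pre-lowercased marker starts there, instead of A's per-marker loop that re-lowercases and rescans the whole text for each marker.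
import Mathlib
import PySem

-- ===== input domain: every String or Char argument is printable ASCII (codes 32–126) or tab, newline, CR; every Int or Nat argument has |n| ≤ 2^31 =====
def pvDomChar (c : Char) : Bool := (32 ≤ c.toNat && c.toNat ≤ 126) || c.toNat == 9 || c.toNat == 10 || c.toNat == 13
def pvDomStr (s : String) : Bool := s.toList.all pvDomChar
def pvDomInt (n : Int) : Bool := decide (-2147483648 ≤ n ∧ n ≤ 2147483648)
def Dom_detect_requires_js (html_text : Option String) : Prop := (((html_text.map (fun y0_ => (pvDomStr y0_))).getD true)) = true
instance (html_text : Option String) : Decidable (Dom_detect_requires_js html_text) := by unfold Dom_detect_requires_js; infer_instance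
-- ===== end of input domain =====

-- B lowercases the text once and scans positions left to right (any marker starting here?)
-- instead of A's per-marker loop that re-lowercases and rescans the text for each marker;
-- objective: alternative structure, same behaviour.

-- ===== PORT A =====
def pvMarkers : List String :=
  [ "You need a browser that supports JavaScript"
  , "JavaScript must be enabled"
  , "This page requires JavaScript"
  , "Enable JavaScript"
  , "Check our current processing times" ]

-- the 'for m in markers' loop of A: first marker whose lowering occurs in the lowered text
def pvMarkerLoop (ms : List String) (s : String) : Bool :=
  match ms with
  | [] => false
  | m :: rest =>
      if PySem.Str.isIn (PySem.Str.lower m) (PySem.Str.lower s) then true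
      else pvMarkerLoop rest s

def detect_requires_js (html_text : Option String) : Bool :=
  match html_text with
  | none => true
  | some s => if s = "" then true else pvMarkerLoop pvMarkers s

-- ===== PORT B =====
-- B's single pass: at each position (suffix) of the text, does some marker start here?
def pvScan (ms : List (List Char)) : List Char → Bool
  | [] => false
  | c :: rest =>
      ms.any (fun m => PySem.Chars.startswith (c :: rest) m) || pvScan ms rest

def detect_requires_js_alt (html_text : Option String) : Bool :=
  match html_text with
  | none => true
  | some s =>
      if s = "" then true
      else
        pvScan (pvMarkers.map (fun m => (PySem.Str.lower m).toList))
               (PySem.Str.lower s).toList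

-- ===== PRECONDITION & SPEC =====
def Spec_detect_requires_js (html_text : Option String) (out : Bool) : Prop := out = detect_requires_js_alt html_text
instance (html_text : Option String) (out : Bool) : Decidable (Spec_detect_requires_js html_text out) := by unfold Spec_detect_requires_js; infer_instance

-- ===== CLAIM (what is proved, stated in full; the proofs are below) =====
def Claim_equal_detect_requires_js : Prop := ∀ (html_text : Option String), Dom_detect_requires_js html_text → Spec_detect_requires_js html_text (detect_requires_js html_text)

-- ===== LEMMAS AND PROOFS =====

-- B's position scan finds exactly the nonempty patterns occurring as an infix
theorem pvScan_iff (ms : List (List Char)) (cs : List Char)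
    (h : ∀ m ∈ ms, m ≠ []) :
    pvScan ms cs = true ↔ ∃ m ∈ ms, m <:+: cs := by
  induction cs with
  | nil =>
      simp only [pvScan, Bool.false_eq_true, false_iff]
      rintro ⟨m, hm, hinf⟩
      exact h m hm (List.infix_nil.mp hinf)
  | cons c rest ih =>
      simp only [pvScan, Bool.or_eq_true, List.any_eq_true,
        PySem.Chars.startswith_iff, ih, List.infix_cons_iff]
      constructor
      · rintro (⟨m, hm, hp⟩ | ⟨m, hm, hi⟩)
        · exact ⟨m, hm, Or.inl hp⟩
        · exact ⟨m, hm, Or.inr hi⟩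
      · rintro ⟨m, hm, hp | hi⟩
        · exact Or.inl ⟨m, hm, hp⟩
        · exact Or.inr ⟨m, hm, hi⟩

-- A's marker loop is a disjunction of containment tests
theorem pvMarkerLoop_iff (ms : List String) (s : String) :
    pvMarkerLoop ms s = true ↔
      ∃ m ∈ ms, (PySem.Str.lower m).toList <:+: (PySem.Str.lower s).toList := by
  induction ms with
  | nil => simp [pvMarkerLoop]
  | cons m rest ih =>
      simp only [pvMarkerLoop]
      split_ifs with hin
      · simp only [true_iff]
        exact ⟨m, List.mem_cons_self, (PySem.Str.isIn_iff_infix _ _).mp hin⟩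
      · rw [ih]
        constructor
        · rintro ⟨x, hx, hi⟩; exact ⟨x, List.mem_cons_of_mem _ hx, hi⟩
        · rintro ⟨x, hx, hi⟩
          rcases List.mem_cons.mp hx with rfl | hx'
          · exact absurd ((PySem.Str.isIn_iff_infix _ _).mpr hi) hin
          · exact ⟨x, hx', hi⟩

theorem pvMarkers_lower_ne_nil :
    ∀ m ∈ pvMarkers.map (fun m => (PySem.Str.lower m).toList), m ≠ [] := by
  decide

-- ===== VERDICT (by name: the statement is the Claim_ definition above) =====
theorem detect_requires_js_spec : Claim_equal_detect_requires_js := by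
  intro html_text _
  unfold Spec_detect_requires_js
  cases html_text with
  | none => rfl
  | some s =>
      simp only [detect_requires_js, detect_requires_js_alt]
      by_cases hs : s = ""
      · simp [hs]
      · rw [if_neg hs, if_neg hs]
        rw [Bool.eq_iff_iff, pvMarkerLoop_iff,
          pvScan_iff _ _ pvMarkers_lower_ne_nil]
        constructor
        · rintro ⟨m, hm, hi⟩
          exact ⟨(PySem.Str.lower m).toList, List.mem_map_of_mem hm, hi⟩
        · rintro ⟨m, hm, hi⟩
          rcases List.mem_map.mp hm with ⟨x, hx, rfl⟩
          exact ⟨x, hx, hi⟩
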